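-- pv_equiv track=rewrite | github.com/dinariyasmine/competitive-programming | E_Boxes_Packing.py | min_visible_boxes
-- ===== SOURCE A (Python) =====
-- def min_visible_boxes(n, boxes):
--     boxes.sort()
--     visible = 0
--
--
--     for i in range(n):
--         can_be_packed = True
--         for j in range(i + 1, n):
--             if boxes[i] < boxes[j]:
--                 can_be_packed = False
--                 break
--         if can_be_packed:
--             visible += 1
--
--     return visible
-- ===== SOURCE B (Python) =====
-- def min_visible_boxes(n, boxes):
--     # Sorts boxes in place (same observable mutation as A), then counts the
--     # maximum of the first n sorted boxes in a single pass.
--     boxes.sort()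
--     if n <= 0:
--         return 0
--     top = boxes[n - 1]
--     return boxes[:n].count(top)
-- ===== Notes on version B (the rewrite author's own statement) =====
-- stated objective: faster
-- what changed: Replaces the quadratic nested suffix scan with a single count of the maximum element of the sorted prefix (after the same sort); Pre_ excludes calls with n beyond the list length, where A raises IndexError except the inconsistent n=1-on-empty corner (A returns 1 without ever indexing) which B's indexing cannot reach.
-- outside the precondition, e.g. on min_visible_boxes(1, []): A returns 1, B raises IndexError
import Mathlib
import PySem

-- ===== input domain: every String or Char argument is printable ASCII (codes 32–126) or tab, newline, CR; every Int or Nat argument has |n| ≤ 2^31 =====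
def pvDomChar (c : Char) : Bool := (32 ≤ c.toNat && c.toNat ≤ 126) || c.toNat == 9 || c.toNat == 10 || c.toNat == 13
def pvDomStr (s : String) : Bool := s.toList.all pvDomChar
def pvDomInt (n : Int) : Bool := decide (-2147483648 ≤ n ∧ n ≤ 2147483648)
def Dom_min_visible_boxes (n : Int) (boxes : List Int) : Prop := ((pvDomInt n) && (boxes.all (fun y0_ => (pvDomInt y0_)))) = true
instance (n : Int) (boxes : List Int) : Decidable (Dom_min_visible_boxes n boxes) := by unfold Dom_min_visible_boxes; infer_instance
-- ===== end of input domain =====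

-- B counts the max of the sorted prefix in one pass instead of A's nested suffix scan;
-- both sort 'boxes' in place in Python — the equivalence proved here is about the return value.

-- ===== PORT A =====
-- inner 'for j in range(i+1, n)' loop with its break
def pvCanPack (bs : List Int) (bi : Int) (js : List Int) : Bool :=
  match js with
  | [] => true
  | j :: rest =>
      if bi < PySem.List.pyGetD bs j 0 then false else pvCanPack bs bi rest

def min_visible_boxes (n : Int) (boxes : List Int) : Int :=
  let bs := PySem.List.sorted boxes id false
  (PySem.List.pyRange 0 n 1).foldl
    (fun visible i =>
      if pvCanPack bs (PySem.List.pyGetD bs i 0) (PySem.List.pyRange (i + 1) n 1)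
      then visible + 1 else visible) 0

-- ===== PORT B =====
def min_visible_boxes_alt (n : Int) (boxes : List Int) : Int :=
  let bs := PySem.List.sorted boxes id false
  if n ≤ 0 then 0
  else
    let top := PySem.List.pyGetD bs (n - 1) 0
    ((PySem.List.slice bs none (some n)).count top : Int)

-- ===== PRECONDITION & SPEC =====
-- Pre_ excludes n > len(boxes): there A raises IndexError (boxes[j] with j ≥ len) on every such call
-- except the degenerate n = 1 on an empty list, where A returns 1 without ever indexing — an artefact
-- of A's index pattern that B's own indexing (boxes[n-1]) cannot reproduce: B raises there too.
def Pre_min_visible_boxes (n : Int) (boxes : List Int) : Prop := n ≤ boxes.length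
instance (n : Int) (boxes : List Int) : Decidable (Pre_min_visible_boxes n boxes) := by
  unfold Pre_min_visible_boxes; infer_instance

def pvWitness_min_visible_boxes : Int × List Int := (3, [2, 1, 2])

def Spec_min_visible_boxes (n : Int) (boxes : List Int) (out : Int) : Prop := out = min_visible_boxes_alt n boxes
instance (n : Int) (boxes : List Int) (out : Int) : Decidable (Spec_min_visible_boxes n boxes out) := by unfold Spec_min_visible_boxes; infer_instance

-- ===== CLAIM (what is proved, stated in full; the proofs are below) =====
def Claim_equal_min_visible_boxes : Prop := ∀ (n : Int) (boxes : List Int), Dom_min_visible_boxes n boxes → Pre_min_visible_boxes n boxes → Spec_min_visible_boxes n boxes (min_visible_boxes n boxes)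


-- ===== LEMMAS AND PROOFS =====

-- the inner loop with break is an 'all' over its index list
lemma pvCanPack_eq_all (bs : List Int) (bi : Int) (js : List Int) :
    pvCanPack bs bi js = js.all (fun j => !decide (bi < PySem.List.pyGetD bs j 0)) := by
  induction js with
  | nil => rfl
  | cons j rest ih =>
      simp only [pvCanPack, List.all_cons]
      by_cases h : bi < PySem.List.pyGetD bs j 0 <;> simp [h, ih]

-- prefix of getD-reads is a take
lemma range_map_getD (bs : List Int) (m : Nat) (hm : m ≤ bs.length) :
    (List.range m).map (fun k => bs.getD k 0) = bs.take m := by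
  apply List.ext_getElem
  · simp [hm]
  · intro k h1 h2
    simp only [List.getElem_map, List.getElem_range, List.getElem_take]
    simp only [List.length_map, List.length_range] at h1
    rw [List.getD_eq_getElem bs 0 (by omega)]

-- sorted: element i of the first m is ≤ element m-1
lemma sorted_le_last (bs : List Int) (hs : bs.Pairwise (· ≤ ·)) (i m : Nat)
    (hi : i < m) (hm : m ≤ bs.length) :
    bs[i]'(by omega) ≤ bs[m - 1]'(by omega) := by
  rcases Nat.lt_or_ge i (m - 1) with h | h
  · exact (List.pairwise_iff_getElem.mp hs) i (m - 1) (by omega) (by omega) h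
  · have : i = m - 1 := by omega
    subst this; rfl

-- the inner loop result, on the sorted list: true iff bs[i] equals bs[m-1]
lemma pvCanPack_iff (bs : List Int) (hs : bs.Pairwise (· ≤ ·)) (i m : Nat)
    (hi : i < m) (hm : m ≤ bs.length) :
    pvCanPack bs (bs[i]'(by omega)) (PySem.List.pyRange ((i : Int) + 1) (m : Int) 1)
      = decide (bs[i]'(by omega) = bs[m - 1]'(by omega)) := by
  rw [pvCanPack_eq_all]
  by_cases heq : bs[i]'(by omega) = bs[m - 1]'(by omega)
  · simp only [heq, decide_true]
    rw [List.all_eq_true]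
    intro j hj
    rw [PySem.List.mem_pyRange_one] at hj
    rw [PySem.List.pyGetD_eq_getElem bs 0 (by omega) (by omega)]
    simp only [Bool.not_eq_true', decide_eq_false_iff_not, not_lt]
    exact sorted_le_last bs hs j.toNat m (by omega) hm
  · simp only [heq, decide_false]
    rw [Bool.eq_false_iff, Ne, List.all_eq_true]
    intro hall
    have hne : i ≠ m - 1 := by
      intro h'; exact heq (by simp only [h'])
    have him1 : i < m - 1 := by omega
    have hmem : ((m : Int) - 1) ∈ PySem.List.pyRange ((i : Int) + 1) (m : Int) 1 := by
      rw [PySem.List.mem_pyRange_one]; omega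
    have hlast := hall _ hmem
    rw [PySem.List.pyGetD_eq_getElem bs 0 (by omega) (by omega)] at hlast
    have htn : ((m : Int) - 1).toNat = m - 1 := by omega
    simp only [htn] at hlast
    simp only [Bool.not_eq_true', decide_eq_false_iff_not, not_lt] at hlast
    exact heq (le_antisymm (sorted_le_last bs hs i m hi hm) hlast)

theorem min_visible_boxes_spec : Claim_equal_min_visible_boxes := by
  intro n boxes _ hpre
  unfold Spec_min_visible_boxes min_visible_boxes min_visible_boxes_alt
  set bs := PySem.List.sorted boxes id false with hbs
  have hlen : bs.length = boxes.length := PySem.List.length_sorted boxes id false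
  have hs : bs.Pairwise (· ≤ ·) := by
    simpa using PySem.List.sorted_pairwise boxes id
  by_cases hn : n ≤ 0
  · rw [PySem.List.pyRange_one_eq_nil hn]
    simp [hn]
  · rw [not_le] at hn
    simp only [if_neg (not_le.mpr hn)]
    obtain ⟨m, rfl⟩ : ∃ m : Nat, n = (m : Int) := ⟨n.toNat, by omega⟩
    have hm0 : 0 < m := by exact_mod_cast hn
    have hmlen : m ≤ bs.length := by
      unfold Pre_min_visible_boxes at hpre; omega
    have hml : m - 1 < bs.length := by omega
    -- the outer loop, over Nat indices
    rw [show PySem.List.pyRange 0 (m : Int) 1 = List.map (Nat.cast : Nat → Int) (List.range m) from by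
      apply List.ext_getElem
      · simp [PySem.List.length_pyRange_one]
      · intro k h1 h2
        rw [PySem.List.getElem_pyRange_one]
        simp]
    rw [List.foldl_map]
    rw [PySem.List.foldl_congr_mem (List.range m) _
      (fun (acc : Int) (k : Nat) => if decide (bs.getD k 0 = bs[m - 1]'hml) then acc + 1 else acc) 0
      (by
        intro acc k hk
        rw [List.mem_range] at hk
        have hkl : k < bs.length := by omega
        rw [PySem.List.pyGetD_eq_getElem bs 0 (by omega) (by omega)]
        simp only [Int.toNat_natCast]
        simp only [pvCanPack_iff bs hs k m hk hmlen, List.getD_eq_getElem bs 0 hkl])]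
    rw [PySem.List.foldl_count_if (fun k : Nat => decide (bs.getD k 0 = bs[m - 1]'hml)) (List.range m) 0]
    -- B's side: count over the prefix
    rw [PySem.List.slice_to_natCast bs m]
    have hget : PySem.List.pyGetD bs ((m : Int) - 1) 0 = bs[m - 1]'hml := by
      rw [PySem.List.pyGetD_eq_getElem bs 0 (by omega) (by omega)]
      congr 1
      omega
    rw [hget]
    rw [← range_map_getD bs m hmlen]
    rw [zero_add]
    congr 1
    rw [List.count_eq_countP, List.countP_map]
    apply List.countP_congr
    intro k hk
    simp
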